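-- pv_equiv track=rewrite | github.com/wang-h/keyword-extractor | scripts/prepare_training_data.py | _norm_span_to_text_span
-- ===== SOURCE A (Python) =====
-- from typing import Dict, List, Optional, Set, Tuple
--
-- def _norm_span_to_text_span(text: str, needle: str) -> Optional[Tuple[int, int]]:
--     """在 text 上按「去空白与 -_」归一化后查找 needle 的字符级 span。"""
--     skips = set(" \n\t\r\-_")
--     text_indices: List[int] = []
--     norm_chars: List[str] = []
--     for i, c in enumerate(text):
--         if c in skips:
--             continue
--         norm_chars.append(c.lower())
--         text_indices.append(i)
--     nn = "".join(c.lower() for c in needle if c not in skips)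
--     if not nn:
--         return None
--     blob = "".join(norm_chars)
--     s = blob.find(nn)
--     if s < 0:
--         return None
--     e = s + len(nn) - 1
--     return (text_indices[s], text_indices[e] + 1)
-- ===== SOURCE B (Python) =====
-- # Direct scan over the raw text (skip-aware two-pointer match per start position);
-- # no normalized blob or index-mapping list is built.
-- def _norm_span_to_text_span(text, needle):
--     skips = set(" \n\t\r\-_")
--     nn = [c.lower() for c in needle if c not in skips]
--     if not nn:
--         return None
--
--     def try_match(start):
--         k = 0
--         for j in range(start, len(text)):
--             c = text[j]
--             if c in skips:
--                 continue
--             if c.lower() != nn[k]: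
--                 return None
--             k += 1
--             if k == len(nn):
--                 return j + 1
--         return None
--
--     for start, c in enumerate(text):
--         if c in skips:
--             continue
--         end = try_match(start)
--         if end is not None:
--             return (start, end)
--     return None
-- ===== Notes on version B (the rewrite author's own statement) =====
-- stated objective: alternative
-- what changed: B matches the needle directly against the raw text with a skip-aware two-pointer scan per start position, instead of A's building a normalized blob plus an index-mapping list and delegating to str.find.
import Mathlib
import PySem

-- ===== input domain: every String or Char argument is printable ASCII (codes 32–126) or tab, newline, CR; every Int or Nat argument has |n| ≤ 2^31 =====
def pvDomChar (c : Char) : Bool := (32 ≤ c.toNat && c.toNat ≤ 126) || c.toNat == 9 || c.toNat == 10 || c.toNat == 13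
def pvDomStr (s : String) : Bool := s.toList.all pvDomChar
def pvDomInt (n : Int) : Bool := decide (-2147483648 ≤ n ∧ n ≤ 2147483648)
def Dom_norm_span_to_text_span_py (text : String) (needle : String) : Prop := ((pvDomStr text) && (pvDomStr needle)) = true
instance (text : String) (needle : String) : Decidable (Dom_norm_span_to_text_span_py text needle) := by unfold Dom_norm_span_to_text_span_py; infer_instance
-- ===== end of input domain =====

-- B replaces A's normalized-blob + index-mapping-list + str.find pipeline by a direct
-- skip-aware two-pointer scan of the raw text (alternative structure, same return value).

-- ===== PORT A =====
-- skips = set(" \n\t\r\-_"); note Python's "\-" is the two characters backslash and '-'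
def pvSkip (c : Char) : Bool :=
  c = ' ' || c = '\n' || c = '\t' || c = '\r' || c = '\\' || c = '-' || c = '_'

def norm_span_to_text_span_py (text : String) (needle : String) : Option (Int × Int) :=
  -- the for-loop building text_indices and norm_chars, as a fold over enumerate(text)
  let st := (PySem.List.enumerate text.toList).foldl
    (fun (st : List Int × List Char) ic =>
      if pvSkip ic.2 then st
      else (st.1 ++ [ic.1], st.2 ++ [PySem.Chars.lowerChar ic.2])) ([], [])
  let nn : List Char := (needle.toList.filter (fun c => !(pvSkip c))).map PySem.Chars.lowerChar
  if nn.isEmpty then none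
  else
    let blob := st.2
    let s := PySem.Chars.find blob nn
    if s < 0 then none
    else
      let e : Int := s + (nn.length : Int) - 1
      some (PySem.List.pyGetD st.1 s 0, PySem.List.pyGetD st.1 e 0 + 1)

-- ===== PORT B =====
-- try_match(start): walk the text suffix, skipping skip chars, consuming nn
def pvTryMatch : List Char → Int → List Char → Option Int
  | _, _, [] => none
  | [], _, _ :: _ => none
  | c :: cs, pos, k :: ks =>
    if pvSkip c then pvTryMatch cs (pos + 1) (k :: ks)
    else if PySem.Chars.lowerChar c = k then
      if ks.isEmpty then some (pos + 1) else pvTryMatch cs (pos + 1) ks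
    else none

-- the outer for-loop over enumerate(text)
def pvScan : List Char → Int → List Char → Option (Int × Int)
  | [], _, _ => none
  | c :: cs, pos, nn =>
    if pvSkip c then pvScan cs (pos + 1) nn
    else
      match pvTryMatch (c :: cs) pos nn with
      | some e => some (pos, e)
      | none => pvScan cs (pos + 1) nn

def norm_span_to_text_span_py_alt (text : String) (needle : String) : Option (Int × Int) :=
  let nn : List Char := (needle.toList.filter (fun c => !(pvSkip c))).map PySem.Chars.lowerChar
  if nn.isEmpty then none
  else pvScan text.toList 0 nn

-- ===== PRECONDITION & SPEC =====
def Spec_norm_span_to_text_span_py (text : String) (needle : String) (out : Option (Int × Int)) : Prop := out = norm_span_to_text_span_py_alt text needle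
instance (text : String) (needle : String) (out : Option (Int × Int)) : Decidable (Spec_norm_span_to_text_span_py text needle out) := by unfold Spec_norm_span_to_text_span_py; infer_instance

-- ===== CLAIM (what is proved, stated in full; the proofs are below) =====
def Claim_equal_norm_span_to_text_span_py : Prop := ∀ (text : String) (needle : String), Dom_norm_span_to_text_span_py text needle → Spec_norm_span_to_text_span_py text needle (norm_span_to_text_span_py text needle)

-- ===== LEMMAS AND PROOFS =====

-- the common view: (original index, lowered char) for every non-skip char of the text
def pvPairs : List Char → Int → List (Int × Char)
  | [], _ => []
  | c :: cs, p =>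
    if pvSkip c then pvPairs cs (p + 1)
    else (p, PySem.Chars.lowerChar c) :: pvPairs cs (p + 1)

-- first suffix of the pair list whose chars start with nn, reported as (start, end)
def pvFindP : List (Int × Char) → List Char → Option (Int × Int)
  | [], _ => none
  | p :: ps, nn =>
    if nn <+: ((p :: ps).map Prod.snd) then
      some (p.1, ((p :: ps).getD (nn.length - 1) (0, ' ')).1 + 1)
    else pvFindP ps nn

lemma pvFold_eq (cs : List Char) (p : Int) (is : List Int) (ncs : List Char) :
    (PySem.List.enumerate cs p).foldl
      (fun (st : List Int × List Char) ic =>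
        if pvSkip ic.2 then st
        else (st.1 ++ [ic.1], st.2 ++ [PySem.Chars.lowerChar ic.2])) (is, ncs)
    = (is ++ (pvPairs cs p).map Prod.fst, ncs ++ (pvPairs cs p).map Prod.snd) := by
  induction cs generalizing p is ncs with
  | nil => simp [PySem.List.enumerate, pvPairs]
  | cons c cs ih =>
    rw [PySem.List.enumerate_cons]
    by_cases h : pvSkip c
    · simp [pvPairs, h, ih]
    · simp [pvPairs, h, ih]

lemma pvFind_eq_of_first (s sub : List Char) (k : Nat) (h1 : sub <+: s.drop k)
    (h2 : ∀ i < k, ¬ sub <+: s.drop i) : PySem.Chars.find s sub = (k : Int) := by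
  have hin : sub <:+: s := h1.isInfix.trans (List.drop_suffix k s).isInfix
  have hge : 0 ≤ PySem.Chars.find s sub := (PySem.Chars.find_nonneg_iff s sub).mpr hin
  obtain ⟨hp, hmin⟩ := PySem.Chars.find_spec hge
  rcases lt_trichotomy (PySem.Chars.find s sub).toNat k with hlt | heq | hgt
  · exact absurd hp (h2 _ hlt)
  · omega
  · exact absurd h1 (hmin k hgt)

lemma pvA_find_eq (P : List (Int × Char)) (nn : List Char) (h : nn ≠ []) :
    (if PySem.Chars.find (P.map Prod.snd) nn < 0 then none
     else some (PySem.List.pyGetD (P.map Prod.fst) (PySem.Chars.find (P.map Prod.snd) nn) 0,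
                PySem.List.pyGetD (P.map Prod.fst)
                  (PySem.Chars.find (P.map Prod.snd) nn + (nn.length : Int) - 1) 0 + 1))
    = pvFindP P nn := by
  obtain ⟨m, hm⟩ : ∃ m, nn.length = m + 1 := ⟨nn.length - 1, by cases nn <;> simp_all⟩
  induction P with
  | nil =>
    have hfnil : PySem.Chars.find (([] : List (Int × Char)).map Prod.snd) nn = -1 := by
      rw [PySem.Chars.find_eq_neg_one_iff]
      simp [List.infix_nil, h]
    rw [hfnil]
    simp [pvFindP]
  | cons p ps ih =>
    by_cases hpre : nn <+: ((p :: ps).map Prod.snd)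
    · have hf : PySem.Chars.find ((p :: ps).map Prod.snd) nn = ((0 : Nat) : Int) := by
        apply pvFind_eq_of_first
        · simpa using hpre
        · omega
      have hmlt : m < (p :: ps).length := by
        have h2 := hpre.length_le
        rw [List.length_map] at h2
        omega
      have hidx : ((0 : Nat) : Int) + (nn.length : Int) - 1 = ((m : Nat) : Int) := by
        rw [hm]; push_cast; ring
      rw [hf, hidx]
      rw [if_neg (show ¬ ((0 : Nat) : Int) < 0 by norm_num)]
      have e0 : PySem.List.pyGetD ((p :: ps).map Prod.fst) ((0 : Nat) : Int) 0 = p.1 := by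
        rw [PySem.List.pyGetD_natCast]
        rfl
      have e1 : PySem.List.pyGetD ((p :: ps).map Prod.fst) ((m : Nat) : Int) 0
          = ((p :: ps).getD (nn.length - 1) (0, ' ')).1 := by
        rw [PySem.List.pyGetD_natCast]
        have hm1 : nn.length - 1 = m := by omega
        rw [hm1, List.getD_eq_getElem _ _ (by simpa using hmlt), List.getD_eq_getElem _ _ hmlt]
        simp only [List.getElem_map]
      rw [e0, e1]
      simp only [pvFindP]
      rw [if_pos hpre]
    · rw [show pvFindP (p :: ps) nn = pvFindP ps nn by
        simp only [pvFindP]; rw [if_neg hpre]]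
      rw [← ih]
      by_cases hinf : nn <:+: (ps.map Prod.snd)
      · -- found in the tail at position k; in the cons list it is at k+1
        have hge : 0 ≤ PySem.Chars.find (ps.map Prod.snd) nn :=
          (PySem.Chars.find_nonneg_iff _ _).mpr hinf
        obtain ⟨hp1, hmin⟩ := PySem.Chars.find_spec hge
        have hfps : PySem.Chars.find (ps.map Prod.snd) nn
            = (((PySem.Chars.find (ps.map Prod.snd) nn).toNat : Nat) : Int) := by omega
        generalize hkk : (PySem.Chars.find (ps.map Prod.snd) nn).toNat = k at hp1 hmin hfps
        have hfcons : PySem.Chars.find ((p :: ps).map Prod.snd) nn = ((k + 1 : Nat) : Int) := by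
          apply pvFind_eq_of_first
          · rw [List.map_cons, List.drop_succ_cons]
            exact hp1
          · intro i hi
            cases i with
            | zero => simpa using hpre
            | succ j =>
              rw [List.map_cons, List.drop_succ_cons]
              exact hmin j (by omega)
        have hlen := hp1.length_le
        rw [List.length_drop, List.length_map] at hlen
        have hkm : k + m < ps.length := by omega
        rw [hfcons, hfps]
        have hi1 : ((k + 1 : Nat) : Int) + (nn.length : Int) - 1 = ((k + 1 + m : Nat) : Int) := by
          rw [hm]; push_cast; ring
        have hi2 : ((k : Nat) : Int) + (nn.length : Int) - 1 = ((k + m : Nat) : Int) := by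
          rw [hm]; push_cast; ring
        rw [hi1, hi2, if_neg (by push_cast; omega), if_neg (by omega)]
        have g1 : PySem.List.pyGetD ((p :: ps).map Prod.fst) ((k + 1 : Nat) : Int) 0
            = PySem.List.pyGetD (ps.map Prod.fst) ((k : Nat) : Int) 0 := by
          rw [PySem.List.pyGetD_natCast, PySem.List.pyGetD_natCast, List.map_cons,
            List.getD_cons_succ]
        have g2 : PySem.List.pyGetD ((p :: ps).map Prod.fst) ((k + 1 + m : Nat) : Int) 0
            = PySem.List.pyGetD (ps.map Prod.fst) ((k + m : Nat) : Int) 0 := by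
          rw [PySem.List.pyGetD_natCast, PySem.List.pyGetD_natCast, List.map_cons,
            show k + 1 + m = (k + m) + 1 by omega, List.getD_cons_succ]
        rw [g1, g2]
      · have h1 : PySem.Chars.find (ps.map Prod.snd) nn = -1 :=
          (PySem.Chars.find_eq_neg_one_iff _ _).mpr hinf
        have h2 : PySem.Chars.find ((p :: ps).map Prod.snd) nn = -1 := by
          rw [PySem.Chars.find_eq_neg_one_iff, List.map_cons]
          intro hc
          rcases List.infix_cons_iff.mp hc with hc1 | hc2
          · exact hpre (by simpa using hc1)
          · exact hinf hc2
        rw [h1, h2]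
        norm_num

lemma pvTryMatch_eq (cs : List Char) (pos : Int) (nn : List Char) (h : nn ≠ []) :
    pvTryMatch cs pos nn
    = (if nn <+: ((pvPairs cs pos).map Prod.snd) then
         some (((pvPairs cs pos).getD (nn.length - 1) (0, ' ')).1 + 1)
       else none) := by
  induction cs generalizing pos nn with
  | nil =>
    obtain ⟨k, ks, rfl⟩ : ∃ k ks, nn = k :: ks := by cases nn <;> simp_all
    simp [pvTryMatch, pvPairs]
  | cons c cs ih =>
    obtain ⟨k, ks, rfl⟩ : ∃ k ks, nn = k :: ks := by cases nn <;> simp_all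
    by_cases hs : pvSkip c
    · simp only [pvTryMatch, pvPairs, hs, if_true]
      exact ih (pos + 1) (k :: ks) (by simp)
    · have hs' : pvSkip c = false := by simpa using hs
      simp only [pvTryMatch, pvPairs, hs', Bool.false_eq_true, if_false, List.map_cons]
      by_cases heq : PySem.Chars.lowerChar c = k
      · rw [if_pos heq]
        by_cases hks : ks = []
        · subst hks
          rw [if_pos (by simp)]
          rw [if_pos (by simp [List.cons_prefix_cons, heq])]
          simp
        · rw [if_neg (by simpa using hks)]
          rw [ih (pos + 1) ks hks]
          by_cases hpre : ks <+: ((pvPairs cs (pos + 1)).map Prod.snd)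
          · rw [if_pos hpre,
              if_pos (by rw [List.cons_prefix_cons]; exact ⟨heq.symm, hpre⟩)]
            obtain ⟨m, hm⟩ : ∃ m, ks.length = m + 1 :=
              ⟨ks.length - 1, by cases ks <;> simp_all⟩
            have hL : (k :: ks).length - 1 = m + 1 := by simp [hm]
            rw [hL, List.getD_cons_succ, hm]
            norm_num
          · rw [if_neg hpre,
              if_neg (by rw [List.cons_prefix_cons]; rintro ⟨-, hc⟩; exact hpre hc)]
      · rw [if_neg heq,
          if_neg (by rw [List.cons_prefix_cons]; rintro ⟨hc, -⟩; exact heq hc.symm)]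

lemma pvScan_eq (cs : List Char) (pos : Int) (nn : List Char) (h : nn ≠ []) :
    pvScan cs pos nn = pvFindP (pvPairs cs pos) nn := by
  induction cs generalizing pos with
  | nil => simp [pvScan, pvPairs, pvFindP]
  | cons c cs ih =>
    by_cases hs : pvSkip c
    · simp only [pvScan, pvPairs, hs, if_true]
      exact ih (pos + 1)
    · have hs' : pvSkip c = false := by simpa using hs
      simp only [pvScan, pvPairs, hs', Bool.false_eq_true, if_false]
      rw [pvTryMatch_eq (c :: cs) pos nn h]
      simp only [pvPairs, hs', Bool.false_eq_true, if_false]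
      by_cases hpre : nn <+: (((pos, PySem.Chars.lowerChar c) :: pvPairs cs (pos + 1)).map Prod.snd)
      · rw [if_pos hpre]
        simp only [pvFindP]
        rw [if_pos hpre]
      · rw [if_neg hpre]
        simp only [pvFindP]
        rw [if_neg hpre]
        exact ih (pos + 1)

-- ===== VERDICT (by name: the statement is the Claim_ definition above) =====
theorem norm_span_to_text_span_py_spec : Claim_equal_norm_span_to_text_span_py := by
  intro text needle _
  unfold Spec_norm_span_to_text_span_py norm_span_to_text_span_py norm_span_to_text_span_py_alt
  simp only [pvFold_eq text.toList 0 [] [], List.nil_append]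
  by_cases hnn : ((needle.toList.filter (fun c => !(pvSkip c))).map PySem.Chars.lowerChar).isEmpty
  · simp [hnn]
  · have hne : (needle.toList.filter (fun c => !(pvSkip c))).map PySem.Chars.lowerChar ≠ [] := by
      simpa [List.isEmpty_iff] using hnn
    simp only [hnn, Bool.false_eq_true, if_false]
    rw [pvScan_eq _ _ _ hne, ← pvA_find_eq _ _ hne]
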